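-- pv_equiv track=rewrite | github.com/yllarti1/pastrimi_pikave_yllarti | processor.py | detect_resection_indices
-- ===== SOURCE A (Python) =====
-- def detect_resection_indices(ids):
--     n = len(ids)
--     resection_indices = set()
--     i = 0
--
--     while i < n:
--         found = False
--         for L in range(2, (n - i) // 2 + 1):
--             if ids[i:i + L] == ids[i + L:i + 2 * L]:
--                 start = i
--                 end = i + 2 * L
--
--                 while end + L <= n and ids[end:end + L] == ids[start:start + L]:
--                     end += L
--
--                 resection_indices.update(range(start, end))
--                 i = end
--                 found = True
--                 break
--
--         if not found:
--             i += 1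
--
--     return resection_indices
-- ===== SOURCE B (Python) =====
-- def _lcp(ids, a, b):
--     # length of the common prefix of the suffixes ids[a:] and ids[b:] (a <= b), no copying
--     n = len(ids)
--     k = 0
--     while b + k < n and ids[a + k] == ids[b + k]:
--         k += 1
--     return k
--
--
-- def _run_end(ids, n, i):
--     # smallest block length L (tried in A's order) whose two adjacent blocks at i match;
--     # the run end follows in closed form from one common-prefix length (r <= n-i-L by construction)
--     L = 2
--     while 2 * L <= n - i:
--         r = _lcp(ids, i, i + L)
--         if r >= L:
--             return i + L + (r // L) * L
--         L += 1
--     return None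
--
--
-- def detect_resection_indices(ids):
--     n = len(ids)
--     runs = []
--     i = 0
--     while i < n:
--         end = _run_end(ids, n, i)
--         if end is None:
--             i += 1
--         else:
--             runs.append((i, end))
--             i = end
--     return {k for s, e in runs for k in range(s, e)}
-- ===== Notes on version B (the rewrite author's own statement) =====
-- stated objective: faster
-- what changed: A compares two freshly built length-L slices for every candidate L, extends a found repeat with a further slice-comparing while-loop, and grows one set in place; B computes a single early-exiting common-prefix length r of the suffixes at i and i+L per candidate L, gets the whole run end in closed form as i+L+(r//L)*L, collects (start,end) intervals in a list and builds the set once at the end from the flattened intervals.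
import Mathlib
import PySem

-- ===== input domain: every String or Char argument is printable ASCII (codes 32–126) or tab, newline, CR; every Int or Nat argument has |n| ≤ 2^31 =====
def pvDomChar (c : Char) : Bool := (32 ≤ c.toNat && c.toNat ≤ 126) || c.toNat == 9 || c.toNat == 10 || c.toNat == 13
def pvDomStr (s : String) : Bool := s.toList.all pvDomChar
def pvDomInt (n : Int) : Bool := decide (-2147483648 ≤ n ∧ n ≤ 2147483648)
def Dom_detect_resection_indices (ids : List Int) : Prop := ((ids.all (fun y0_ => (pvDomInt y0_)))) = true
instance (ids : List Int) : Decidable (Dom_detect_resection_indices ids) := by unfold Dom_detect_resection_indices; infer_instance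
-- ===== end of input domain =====

-- B replaces A's per-L slice comparisons and block-extension while-loop by one early-exiting
-- common-prefix length per candidate L with a closed-form run end, collects (start, end)
-- intervals and builds the result set once at the end (objective: faster).

-- ===== PORT A =====
-- inner 'while end + L <= n and ids[end:end+L] == ids[start:start+L]: end += L'
-- ('2 ≤ L' is a totality-only guard: every call site has L from range(2, …), so it is always true there)
def pvExtendA (ids : List Int) (n i L : Int) (e : Int) : Int :=
  if _h : e + L ≤ n ∧ 2 ≤ L ∧
      PySem.List.slice ids (some e) (some (e + L)) = PySem.List.slice ids (some i) (some (i + L))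
  then pvExtendA ids n i L (e + L)
  else e
termination_by (n - e).toNat
decreasing_by omega

-- 'for L in range(2, (n-i)//2+1): if ids[i:i+L]==ids[i+L:i+2L]: … break' (some = found: value is the new i)
def pvFindA (ids : List Int) (n i : Int) : List Int → Option Int
  | [] => none
  | L :: Ls =>
    if PySem.List.slice ids (some i) (some (i + L)) =
        PySem.List.slice ids (some (i + L)) (some (i + 2 * L))
    then some (pvExtendA ids n i L (i + 2 * L))
    else pvFindA ids n i Ls

-- outer 'while i < n' (fuel n+1 suffices: i strictly increases each iteration)
def pvLoopA (ids : List Int) (n : Int) : Nat → Int → PySem.Set Int → PySem.Set Int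
  | 0, _, acc => acc
  | fuel + 1, i, acc =>
    if i < n then
      match pvFindA ids n i (PySem.List.pyRange 2 (PySem.Int.floordiv (n - i) 2 + 1) 1) with
      | some e => pvLoopA ids n fuel e (PySem.Set.update acc (PySem.List.pyRange i e 1))
      | none => pvLoopA ids n fuel (i + 1) acc
    else acc

def detect_resection_indices (ids : List Int) : List Int :=
  pvLoopA ids (ids.length : Int) (ids.length + 1) 0 PySem.Set.empty

-- ===== PORT B =====
-- 'while b + k < n and ids[a+k] == ids[b+k]: k += 1' of Source B's _lcp
def pvLcpGo (ids : List Int) (n a b : Int) (k : Int) : Int :=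
  if _h : b + k < n ∧ PySem.List.pyGetD ids (a + k) 0 = PySem.List.pyGetD ids (b + k) 0
  then pvLcpGo ids n a b (k + 1)
  else k
termination_by (n - (b + k)).toNat
decreasing_by omega

def pvLcpB (ids : List Int) (a b : Int) : Int := pvLcpGo ids (ids.length : Int) a b 0

-- Source B's _run_end: 'L = 2; while 2*L <= n-i: r = _lcp(…); if r >= L: return i+L+(r//L)*L; L += 1'
def pvRunEndB (ids : List Int) (n i : Int) (L : Int) : Option Int :=
  if _h : 2 * L ≤ n - i then
    if pvLcpB ids i (i + L) ≥ L then
      some (i + L + PySem.Int.floordiv (pvLcpB ids i (i + L)) L * L)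
    else pvRunEndB ids n i (L + 1)
  else none
termination_by (n - i - 2 * L + 2).toNat
decreasing_by omega

-- the outer 'while i < n' collecting (start, end) intervals (fuel n+1 suffices)
def pvRunsB (ids : List Int) (n : Int) : Nat → Int → List (Int × Int)
  | 0, _ => []
  | fuel + 1, i =>
    if i < n then
      match pvRunEndB ids n i 2 with
      | some e => (i, e) :: pvRunsB ids n fuel e
      | none => pvRunsB ids n fuel (i + 1)
    else []

-- '{k for s, e in runs for k in range(s, e)}'
def detect_resection_indices_alt (ids : List Int) : List Int :=
  PySem.Set.ofList
    ((pvRunsB ids (ids.length : Int) (ids.length + 1) 0).flatMap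
      (fun p => PySem.List.pyRange p.1 p.2 1))

-- ===== PRECONDITION & SPEC =====
def Spec_detect_resection_indices (ids : List Int) (out : List Int) : Prop := out = detect_resection_indices_alt ids
instance (ids : List Int) (out : List Int) : Decidable (Spec_detect_resection_indices ids out) := by unfold Spec_detect_resection_indices; infer_instance

-- ===== CLAIM (what is proved, stated in full; the proofs are below) =====
def Claim_equal_detect_resection_indices : Prop := ∀ (ids : List Int), Dom_detect_resection_indices ids → Spec_detect_resection_indices ids (detect_resection_indices ids)

-- ===== LEMMAS AND PROOFS =====

-- common prefix length, Nat world
def lcpN : List Int → List Int → Nat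
  | x :: xs, y :: ys => if x = y then lcpN xs ys + 1 else 0
  | _, _ => 0

theorem lcpN_le_right : ∀ (xs ys : List Int), lcpN xs ys ≤ ys.length
  | [], _ => by simp [lcpN]
  | _ :: _, [] => by simp [lcpN]
  | x :: xs, y :: ys => by
    simp only [lcpN, List.length_cons]
    split
    · exact Nat.succ_le_succ (lcpN_le_right xs ys)
    · omega

theorem take_eq_take_iff_getElem? (xs ys : List Int) (k : Nat) :
    xs.take k = ys.take k ↔ ∀ j < k, xs[j]? = ys[j]? := by
  constructor
  · intro h j hj
    have := congrArg (fun l => l[j]?) h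
    simpa [List.getElem?_take_of_lt hj] using this
  · intro h
    apply List.ext_getElem?
    intro j
    by_cases hj : j < k
    · simp [List.getElem?_take_of_lt hj, h j hj]
    · rw [List.getElem?_eq_none (by simp; omega), List.getElem?_eq_none (by simp; omega)]

theorem lcpN_ge_iff (k : Nat) : ∀ (xs ys : List Int),
    (k ≤ lcpN xs ys ↔ k ≤ xs.length ∧ k ≤ ys.length ∧ xs.take k = ys.take k) := by
  induction k with
  | zero => intro xs ys; simp
  | succ k ih =>
    intro xs ys
    match xs, ys with
    | [], _ => simp [lcpN]
    | _ :: _, [] => simp [lcpN]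
    | x :: xs, y :: ys =>
      simp only [lcpN, List.length_cons, List.take_succ_cons]
      by_cases hxy : x = y
      · subst hxy
        rw [if_pos rfl]
        constructor
        · intro h
          have := (ih xs ys).mp (by omega)
          refine ⟨by omega, by omega, by simp [this.2.2]⟩
        · rintro ⟨h1, h2, h3⟩
          have : k ≤ lcpN xs ys := (ih xs ys).mpr ⟨by omega, by omega, by simpa using h3⟩
          omega
      · rw [if_neg hxy]
        constructor
        · omega
        · rintro ⟨-, -, h3⟩
          exact absurd (by simpa using congrArg (fun l => l.head?) h3) hxy

-- pointwise characterisation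
theorem lcpN_ge_iff' (xs ys : List Int) (k : Nat) (h1 : k ≤ xs.length) (h2 : k ≤ ys.length) :
    (k ≤ lcpN xs ys ↔ ∀ j < k, xs[j]? = ys[j]?) := by
  rw [lcpN_ge_iff, ← take_eq_take_iff_getElem?]
  tauto

theorem lcpN_nil_right : ∀ xs : List Int, lcpN xs [] = 0
  | [] => rfl
  | _ :: _ => rfl

theorem lcpGo_eq (ids : List Int) (aN bN kN : Nat) (hab : aN ≤ bN) :
    pvLcpGo ids (ids.length : Int) (aN : Int) (bN : Int) (kN : Int) =
      (kN : Int) + (lcpN (ids.drop (aN + kN)) (ids.drop (bN + kN)) : Int) := by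
  by_cases hlt : bN + kN < ids.length
  · have haN : aN + kN < ids.length := by omega
    rw [pvLcpGo]
    have hget : ∀ (m : Nat) (hm : m < ids.length),
        PySem.List.pyGetD ids ((m : Int)) 0 = ids[m] := by
      intro m hm
      rw [PySem.List.pyGetD_natCast]
      exact List.getD_eq_getElem ids 0 hm
    have hda : ids.drop (aN + kN) = ids[aN + kN] :: ids.drop (aN + kN + 1) :=
      List.drop_eq_getElem_cons haN
    have hdb : ids.drop (bN + kN) = ids[bN + kN] :: ids.drop (bN + kN + 1) :=
      List.drop_eq_getElem_cons hlt
    by_cases heq : ids[aN + kN] = ids[bN + kN]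
    · rw [dif_pos]
      · have hrec := lcpGo_eq ids aN bN (kN + 1) hab
        rw [show ((kN : Int) + 1) = ((kN + 1 : Nat) : Int) by push_cast; ring, hrec,
            show aN + (kN + 1) = aN + kN + 1 by omega, show bN + (kN + 1) = bN + kN + 1 by omega,
            hda, hdb, lcpN, if_pos heq]
        push_cast
        ring
      · constructor
        · exact_mod_cast hlt
        · rw [show (aN : Int) + (kN : Int) = ((aN + kN : Nat) : Int) by push_cast; ring,
              show (bN : Int) + (kN : Int) = ((bN + kN : Nat) : Int) by push_cast; ring,
              hget _ haN, hget _ hlt, heq]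
    · rw [dif_neg]
      · rw [hda, hdb, lcpN, if_neg heq]; push_cast; ring
      · rintro ⟨-, habs⟩
        rw [show (aN : Int) + (kN : Int) = ((aN + kN : Nat) : Int) by push_cast; ring,
            show (bN : Int) + (kN : Int) = ((bN + kN : Nat) : Int) by push_cast; ring,
            hget _ haN, hget _ hlt] at habs
        exact heq habs
  · rw [pvLcpGo, dif_neg]
    · rw [List.drop_eq_nil_of_le (by omega : ids.length ≤ bN + kN), lcpN_nil_right]
      simp
    · rintro ⟨habs, -⟩
      exact hlt (by exact_mod_cast habs)
termination_by ids.length - (bN + kN)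
decreasing_by omega

-- pointwise characterisation of lcpN s (s.drop LN)
theorem lcp_shift_iff (s : List Int) (LN k : Nat) (hk : k + LN ≤ s.length) :
    (k ≤ lcpN s (s.drop LN) ↔ ∀ j < k, s[j]? = s[j + LN]?) := by
  rw [lcpN_ge_iff' s (s.drop LN) k (by omega) (by simp; omega)]
  constructor
  · intro h j hj
    rw [h j hj, List.getElem?_drop]
    congr 1; omega
  · intro h j hj
    rw [h j hj, List.getElem?_drop]
    congr 1; omega

-- chaining: if the first m blocks repeat, s[t] = s[t + m*LN]
theorem lcp_chain (s : List Int) (LN : Nat) :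
    ∀ (m t : Nat), (m + 1) * LN ≤ s.length → m * LN ≤ lcpN s (s.drop LN) → t < LN →
      s[t]? = s[t + m * LN]? := by
  intro m
  induction m with
  | zero => intro t _ _ _; simp
  | succ m ih =>
    intro t hn hr ht
    have hn' : (m + 1) * LN ≤ s.length := by nlinarith
    have hr' : m * LN ≤ lcpN s (s.drop LN) := by nlinarith
    have h1 := ih t hn' hr' ht
    have hchar := (lcp_shift_iff s LN ((m + 1) * LN) (by nlinarith)).mp (by omega)
    have h2 := hchar (t + m * LN) (by nlinarith)
    rw [h1, h2]
    congr 1; ring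

-- block m+1 equals block 0, given blocks 0..m equal
theorem block_iff (s : List Int) (LN m : Nat) (hL : 0 < LN)
    (hm : m * LN ≤ lcpN s (s.drop LN)) (hn : (m + 2) * LN ≤ s.length) :
    ((s.drop ((m + 1) * LN)).take LN = s.take LN) ↔ (m + 1) * LN ≤ lcpN s (s.drop LN) := by
  rw [take_eq_take_iff_getElem?]
  constructor
  · intro h
    rw [lcp_shift_iff s LN ((m + 1) * LN) (by nlinarith)]
    intro j hj
    by_cases hjm : j < m * LN
    · exact (lcp_shift_iff s LN (m * LN) (by nlinarith)).mp hm j hjm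
    · -- j = m*LN + t with t < LN
      have e1 : (m + 1) * LN = m * LN + LN := by ring
      set t := j - m * LN with hts
      have htL : t < LN := by omega
      have hblk := h t htL
      rw [List.getElem?_drop] at hblk
      have hch := lcp_chain s LN m t (by nlinarith) hm htL
      calc s[j]? = s[t + m * LN]? := by congr 1; omega
        _ = s[t]? := (lcp_chain s LN m t (by nlinarith) hm htL).symm
        _ = s[(m + 1) * LN + t]? := hblk.symm
        _ = s[j + LN]? := by congr 1; omega
  · intro h j hj
    have hch := lcp_chain s LN (m + 1) j (by nlinarith) h hj
    rw [List.getElem?_drop, show (m + 1) * LN + j = j + (m + 1) * LN by ring, ← hch]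

-- A's extension while-loop computes the closed-form run end
theorem extend_eq (ids : List Int) (iN LN : Nat) (hL : 2 ≤ LN) (m : Nat) (hm1 : 1 ≤ m)
    (hmr : m * LN ≤ lcpN (ids.drop iN) ((ids.drop iN).drop LN))
    (hmn : iN + (m + 1) * LN ≤ ids.length) :
    pvExtendA ids (ids.length : Int) (iN : Int) (LN : Int) ((iN : Int) + ((m : Int) + 1) * (LN : Int)) =
      (iN : Int) +
        ((min (lcpN (ids.drop iN) ((ids.drop iN).drop LN) / LN) ((ids.length - iN) / LN - 1) : Nat) + 1) * (LN : Int) := by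
  set s := ids.drop iN with hs
  set r := lcpN s (s.drop LN) with hr
  have hsl : s.length = ids.length - iN := by simp [hs]
  set M := min (r / LN) ((ids.length - iN) / LN - 1) with hM
  -- slice bridges
  have hslice0 : PySem.List.slice ids (some (iN : Int)) (some ((iN : Int) + (LN : Int))) = s.take LN := by
    rw [PySem.List.slice_natCast_add, hs]
  have hsliceM : ∀ (j : Nat),
      PySem.List.slice ids (some ((iN + j : Nat) : Int)) (some (((iN + j : Nat) : Int) + (LN : Int))) =
        (s.drop j).take LN := by
    intro j
    rw [PySem.List.slice_natCast_add, hs, List.drop_drop]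
  clear_value M
  induction hd : M - m generalizing m with
  | zero =>
    have hmM : m ≤ M := by
      have h1 : m ≤ r / LN := Nat.le_div_iff_mul_le (by omega) |>.mpr hmr
      have h2 : m + 1 ≤ (ids.length - iN) / LN := Nat.le_div_iff_mul_le (by omega) |>.mpr (by omega)
      omega
    have hmeq : m = M := by omega
    rw [pvExtendA, dif_neg]
    · rw [hmeq]
    · rintro ⟨h1, -, h3⟩
      -- loop condition holds: then m + 1 ≤ M, contradiction with m = M
      have hn2 : iN + (m + 2) * LN ≤ ids.length := by
        have : (iN : Int) + ((m : Int) + 1) * (LN : Int) + (LN : Int) ≤ (ids.length : Int) := h1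
        have := this
        push_cast at this
        nlinarith [this]
      have hb := (block_iff s LN m (by omega) hmr (by omega)).mp (by
        have h3' := h3
        rw [hslice0] at h3'
        rw [show (iN : Int) + ((m : Int) + 1) * (LN : Int) = ((iN + (m + 1) * LN : Nat) : Int) by push_cast; ring] at h3'
        rw [hsliceM ((m + 1) * LN)] at h3'
        exact h3')
      have h1' : m + 1 ≤ r / LN := Nat.le_div_iff_mul_le (by omega) |>.mpr hb
      have h2' : m + 2 ≤ (ids.length - iN) / LN := Nat.le_div_iff_mul_le (by omega) |>.mpr (by omega)
      omega
  | succ d ih =>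
    -- m < M, so the loop condition holds
    have hlt : m < M := by omega
    have hn2 : iN + (m + 2) * LN ≤ ids.length := by
      have h2 : m + 2 ≤ (ids.length - iN) / LN := by omega
      have := Nat.le_div_iff_mul_le (k := LN) (by omega) |>.mp h2
      omega
    have hb : (m + 1) * LN ≤ r := by
      have h1 : m + 1 ≤ r / LN := by omega
      exact Nat.le_div_iff_mul_le (by omega) |>.mp h1
    rw [pvExtendA, dif_pos]
    · rw [show (iN : Int) + ((m : Int) + 1) * (LN : Int) + (LN : Int) =
            (iN : Int) + (((m + 1 : Nat) : Int) + 1) * (LN : Int) by push_cast; ring]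
      have hn2' : iN + (m + 1 + 1) * LN ≤ ids.length := by
        have h : m + 1 + 1 = m + 2 := by omega
        rw [h]; exact hn2
      apply ih (m + 1) <;> first | exact hb | exact hn2' | omega
    · refine ⟨by nlinarith, by exact_mod_cast hL, ?_⟩
      rw [hslice0]
      rw [show (iN : Int) + ((m : Int) + 1) * (LN : Int) = ((iN + (m + 1) * LN : Nat) : Int) by push_cast; ring]
      rw [hsliceM ((m + 1) * LN)]
      exact (block_iff s LN m (by omega) hmr (by omega)).mpr hb

-- B's r is the lcp of the two suffixes
theorem lcpB_eq (ids : List Int) (iN LN : Nat) :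
    pvLcpB ids (iN : Int) ((iN : Int) + (LN : Int)) =
      (lcpN (ids.drop iN) ((ids.drop iN).drop LN) : Int) := by
  unfold pvLcpB
  rw [show (iN : Int) + (LN : Int) = ((iN + LN : Nat) : Int) by push_cast; ring,
      show (0 : Int) = ((0 : Nat) : Int) by simp,
      lcpGo_eq ids iN (iN + LN) 0 (by omega), List.drop_drop]
  simp

-- Nat division: (M - LN) / LN = M / LN - 1 for LN ≤ M, 0 < LN
theorem sub_div_self_eq (M LN : Nat) (h : LN ≤ M) (h0 : 0 < LN) :
    (M - LN) / LN = M / LN - 1 := by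
  rcases Nat.exists_eq_add_of_le h with ⟨c, rfl⟩
  rw [Nat.add_sub_cancel_left, show LN + c = c + LN by omega, Nat.add_div_right _ h0,
      Nat.add_sub_cancel]

-- A's L-scan over range(2, (n-i)//2+1) equals B's counter loop, from any common L
theorem scan_eq (ids : List Int) (iN LN : Nat) (hi : iN ≤ ids.length) (hL : 2 ≤ LN) :
    pvFindA ids (ids.length : Int) (iN : Int)
        (PySem.List.pyRange (LN : Int) (PySem.Int.floordiv ((ids.length : Int) - (iN : Int)) 2 + 1) 1)
      = pvRunEndB ids (ids.length : Int) (iN : Int) (LN : Int) := by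
  have hMcast : (ids.length : Int) - (iN : Int) = ((ids.length - iN : Nat) : Int) := by omega
  by_cases hcond : iN + 2 * LN ≤ ids.length
  · -- L is in the range and the while-guard 2L ≤ n-i holds
    have hq : (LN : Int) < PySem.Int.floordiv ((ids.length : Int) - (iN : Int)) 2 + 1 := by
      have : (LN : Int) ≤ PySem.Int.floordiv ((ids.length : Int) - (iN : Int)) 2 := by
        rw [PySem.Int.le_floordiv_iff_mul_le (by omega)]
        omega
      omega
    rw [PySem.List.pyRange_one_cons hq]
    set s := ids.drop iN with hs
    have hsl : s.length = ids.length - iN := by simp [hs]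
    set rN := lcpN s (s.drop LN) with hrN
    have hd2 : ids.drop (iN + LN) = s.drop LN := by
      rw [hs, List.drop_drop]
    have hsliceA : PySem.List.slice ids (some (iN : Int)) (some ((iN : Int) + (LN : Int))) = s.take LN := by
      rw [PySem.List.slice_natCast_add, hs]
    have hsliceA2 : PySem.List.slice ids (some ((iN : Int) + (LN : Int))) (some ((iN : Int) + 2 * (LN : Int))) =
        (s.drop LN).take LN := by
      rw [show (iN : Int) + (LN : Int) = ((iN + LN : Nat) : Int) by push_cast; ring,
          show (iN : Int) + 2 * (LN : Int) = ((iN + 2 * LN : Nat) : Int) by push_cast; ring,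
          PySem.List.slice_natCast, hd2]
      congr 1
      omega
    have hcnd : (s.take LN = (s.drop LN).take LN) ↔ LN ≤ rN := by
      rw [hrN, lcpN_ge_iff]
      have h1 : LN ≤ s.length := by omega
      have h2 : LN ≤ (s.drop LN).length := by simp; omega
      tauto
    rw [pvRunEndB, dif_pos (by omega : 2 * (LN : Int) ≤ (ids.length : Int) - (iN : Int))]
    simp only [pvFindA]
    rw [hsliceA, hsliceA2, lcpB_eq ids iN LN, ← hs, ← hrN]
    by_cases hfound : LN ≤ rN
    · rw [if_pos (hcnd.mpr hfound), if_pos (by exact_mod_cast hfound)]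
      congr 1
      rw [show (iN : Int) + 2 * (LN : Int) = (iN : Int) + (((1 : Nat) : Int) + 1) * (LN : Int) by push_cast; ring]
      rw [extend_eq ids iN LN hL 1 (by omega) (by rw [one_mul, ← hs, ← hrN]; exact hfound) (by omega)]
      -- B's closed form: the min in A's form is rN / LN, since rN ≤ (len - iN) - LN
      have hrM : rN ≤ (ids.length - iN) - LN := by
        have := lcpN_le_right s (s.drop LN)
        simp [hsl] at this
        omega
      have hmin : min (rN / LN) ((ids.length - iN) / LN - 1) = rN / LN := by
        have h1 : rN / LN ≤ ((ids.length - iN) - LN) / LN := Nat.div_le_div_right hrM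
        rw [sub_div_self_eq (ids.length - iN) LN (by omega) (by omega)] at h1
        omega
      rw [hmin, PySem.Int.floordiv_natCast]
      push_cast
      ring
    · rw [if_neg (fun h => hfound (hcnd.mp h)), if_neg (by
        intro habs
        exact hfound (by exact_mod_cast habs))]
      rw [show (LN : Int) + 1 = ((LN + 1 : Nat) : Int) by push_cast; ring]
      exact scan_eq ids iN (LN + 1) hi (by omega)
  · -- range exhausted on both sides
    rw [PySem.List.pyRange_one_eq_nil (by
      have : PySem.Int.floordiv ((ids.length : Int) - (iN : Int)) 2 < (LN : Int) := by
        rw [PySem.Int.floordiv_lt_iff_lt_mul (by omega)]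
        omega
      omega)]
    rw [pvRunEndB, dif_neg (by omega : ¬ 2 * (LN : Int) ≤ (ids.length : Int) - (iN : Int))]
    rfl
termination_by ids.length + 2 - (iN + 2 * LN)
decreasing_by omega

-- a hit of B's scan lies strictly beyond i
theorem runEndB_lt (ids : List Int) (n i : Int) (L : Int) (hL : 0 < L) (e : Int)
    (h : pvRunEndB ids n i L = some e) : i < e := by
  rw [pvRunEndB] at h
  split at h
  · split at h
    · rename_i hr
      have he : e = i + L + PySem.Int.floordiv (pvLcpB ids i (i + L)) L * L := ((Option.some.injEq _ _).mp h).symm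
      have h0 : 0 ≤ PySem.Int.floordiv (pvLcpB ids i (i + L)) L := by
        rw [PySem.Int.le_floordiv_iff_mul_le hL]
        omega
      nlinarith
    · exact runEndB_lt ids n i (L + 1) (by omega) e h
  · simp at h
termination_by (n - i - 2 * L + 2).toNat
decreasing_by rename_i h' _; omega

-- the flattened intervals of B: all elements ≥ i, and no duplicates
theorem runs_flat_facts (ids : List Int) (n : Int) : ∀ (fuel : Nat) (i : Int),
    (∀ x ∈ (pvRunsB ids n fuel i).flatMap (fun p => PySem.List.pyRange p.1 p.2 1), i ≤ x) ∧
      ((pvRunsB ids n fuel i).flatMap (fun p => PySem.List.pyRange p.1 p.2 1)).Nodup := by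
  intro fuel
  induction fuel with
  | zero => intro i; simp [pvRunsB]
  | succ fuel ih =>
    intro i
    simp only [pvRunsB]
    by_cases hlt : i < n
    · rw [if_pos hlt]
      cases hB : pvRunEndB ids n i 2 with
      | none =>
        obtain ⟨ihm, ihn⟩ := ih (i + 1)
        exact ⟨fun x hx => by have := ihm x hx; omega, ihn⟩
      | some e =>
        have hie : i < e := runEndB_lt ids n i 2 (by omega) e hB
        obtain ⟨ihm, ihn⟩ := ih e
        simp only [List.flatMap_cons]
        constructor
        · intro x hx
          rcases List.mem_append.mp hx with hx | hx
          · exact (PySem.List.mem_pyRange_one.mp hx).1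
          · have := ihm x hx; omega
        · refine List.Nodup.append (PySem.List.nodup_pyRange_one _ _) ihn ?_
          intro x hx1 hx2
          have h1 := (PySem.List.mem_pyRange_one.mp hx1).2
          have h2 := ihm x hx2
          omega
    · rw [if_neg hlt]; simp
  
-- A's outer loop appends exactly B's flattened intervals to the accumulated set
theorem loopA_eq (ids : List Int) : ∀ (fuel : Nat) (i : Int) (acc : PySem.Set Int),
    0 ≤ i → acc.Nodup → (∀ x ∈ acc, x < i) →
    pvLoopA ids (ids.length : Int) fuel i acc =
      acc ++ (pvRunsB ids (ids.length : Int) fuel i).flatMap (fun p => PySem.List.pyRange p.1 p.2 1) := by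
  intro fuel
  induction fuel with
  | zero => intro i acc _ _ _; simp [pvLoopA, pvRunsB]
  | succ fuel ih =>
    intro i acc hi hnd hbd
    simp only [pvLoopA, pvRunsB]
    by_cases hlt : i < (ids.length : Int)
    · rw [if_pos hlt, if_pos hlt]
      have hiN : i = (i.toNat : Int) := by omega
      have hfind : pvFindA ids (ids.length : Int) i
          (PySem.List.pyRange 2 (PySem.Int.floordiv ((ids.length : Int) - i) 2 + 1) 1) =
          pvRunEndB ids (ids.length : Int) i 2 := by
        rw [hiN, show (2 : Int) = ((2 : Nat) : Int) by simp]
        exact scan_eq ids i.toNat 2 (by omega) (by omega)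
      rw [hfind]
      cases hB : pvRunEndB ids (ids.length : Int) i 2 with
      | none =>
        dsimp only
        exact ih (i + 1) acc (by omega) hnd (fun x hx => by have := hbd x hx; omega)
      | some e =>
        dsimp only
        have hie : i < e := runEndB_lt ids (ids.length : Int) i 2 (by omega) e hB
        have hup : PySem.Set.update acc (PySem.List.pyRange i e 1) = acc ++ PySem.List.pyRange i e 1 :=
          PySem.Set.update_eq_append_of_disjoint _ _ (PySem.List.nodup_pyRange_one _ _)
            (fun x hx hxa => by
              have h1 := (PySem.List.mem_pyRange_one.mp hx).1
              have h2 := hbd x hxa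
              omega)
        rw [hup, ih e (acc ++ PySem.List.pyRange i e 1) (by omega)
          (hnd.append (PySem.List.nodup_pyRange_one _ _)
            (fun x hxa hxr => by
              have h1 := (PySem.List.mem_pyRange_one.mp hxr).1
              have h2 := hbd x hxa
              omega))
          (fun x hx => by
            rcases List.mem_append.mp hx with hx | hx
            · have := hbd x hx; omega
            · exact (PySem.List.mem_pyRange_one.mp hx).2)]
        simp only [List.flatMap_cons, List.append_assoc]
    · rw [if_neg hlt, if_neg hlt]
      simp

-- ===== VERDICT (by name: the statement is the Claim_ definition above) =====
theorem detect_resection_indices_spec : Claim_equal_detect_resection_indices := by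
  intro ids _
  unfold Spec_detect_resection_indices detect_resection_indices detect_resection_indices_alt
  rw [loopA_eq ids (ids.length + 1) 0 PySem.Set.empty (by omega) (by simp [PySem.Set.empty]) (by simp [PySem.Set.empty])]
  rw [PySem.Set.ofList_eq_self_of_nodup _ (runs_flat_facts ids (ids.length : Int) (ids.length + 1) 0).2]
  simp [PySem.Set.empty]
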